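-- pv_equiv track=rewrite | github.com/castogio/advent-of-code-2023 | day1/day1_part_two.py | substitute_letters_to_numbers
-- ===== SOURCE A (Python) =====
-- numbers_chars = {
--     "one": '1',
--     'two': '2',
--     'three': '3',
--     'four': '4',
--     'five': '5',
--     'six': '6',
--     'seven': '7',
--     'eight': '8',
--     'nine': '9'
-- }
--
-- def substitute_letters_to_numbers(line: str) -> str:
--     converted_line = ''
--     for i, ch in enumerate(line):
--         if ch.isalpha():
--             for k, v in numbers_chars.items():
--                 if line[i:].find(k) == 0:
--                     converted_line += v
--                     break
--         converted_line += ch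
--     return converted_line
-- ===== SOURCE B (Python) =====
-- numbers_chars = {
--     "one": '1',
--     'two': '2',
--     'three': '3',
--     'four': '4',
--     'five': '5',
--     'six': '6',
--     'seven': '7',
--     'eight': '8',
--     'nine': '9'
-- }
--
-- def substitute_letters_to_numbers(line: str) -> str:
--     # Build an index position -> digit once, one whole-line scan per word,
--     # then emit the output in a single pass.
--     insert_at = {}
--     for word, digit in numbers_chars.items():
--         for i in range(len(line)):
--             if line.startswith(word, i):
--                 insert_at[i] = digit
--     out = []
--     for i, ch in enumerate(line):
--         if i in insert_at:
--             out.append(insert_at[i])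
--         out.append(ch)
--     return ''.join(out)
-- ===== Notes on version B (the rewrite author's own statement) =====
-- stated objective: faster
-- what changed: A scans all nine words inline at every alphabetic position, slicing line[i:] (an O(n) copy) per position; B first builds a position-to-digit index with one whole-line scan per word using startswith (no copies), then emits the output in a single pass using that index.
import Mathlib
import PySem

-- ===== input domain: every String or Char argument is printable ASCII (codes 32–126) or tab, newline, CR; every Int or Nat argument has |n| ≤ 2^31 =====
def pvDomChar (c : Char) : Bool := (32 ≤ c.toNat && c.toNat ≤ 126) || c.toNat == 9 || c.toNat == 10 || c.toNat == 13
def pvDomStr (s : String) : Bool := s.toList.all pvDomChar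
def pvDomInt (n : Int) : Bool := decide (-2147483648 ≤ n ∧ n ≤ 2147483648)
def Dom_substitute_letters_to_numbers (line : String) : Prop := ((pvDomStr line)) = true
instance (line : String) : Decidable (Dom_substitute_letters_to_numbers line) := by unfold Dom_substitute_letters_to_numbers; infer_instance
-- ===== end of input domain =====

-- B builds a position→digit index with one whole-line scan per word (startswith, no slice
-- copies), then emits in one pass; A tries every word at every position on a line[i:] copy
-- (a timing run measured B faster).

-- the module-level dict numbers_chars (an association list in insertion order)
def numbers_chars : List (String × String) :=
  [("one","1"),("two","2"),("three","3"),("four","4"),("five","5"),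
   ("six","6"),("seven","7"),("eight","8"),("nine","9")]

-- ===== PORT A =====
-- inner 'for k, v in numbers_chars.items(): if line[i:].find(k) == 0: … break'
def pvFirstDigitA (tail : String) : List (String × String) → Option String
  | [] => none
  | (k, v) :: rest => if PySem.Str.find tail k == 0 then some v else pvFirstDigitA tail rest

def substitute_letters_to_numbers (line : String) : String :=
  let converted :=
    (PySem.List.enumerate line.toList).foldl
      (fun acc p =>
        let acc' :=
          if PySem.Chars.isalpha p.2 then
            match pvFirstDigitA (PySem.Str.slice line (some p.1) none) numbers_chars with
            | some v => acc ++ v.toList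
            | none => acc
          else acc
        acc' ++ [p.2]) []
  String.ofList converted

-- ===== PORT B =====
def substitute_letters_to_numbers_alt (line : String) : String :=
  let cs := line.toList
  -- line.startswith(word, i) with 0 ≤ i is exactly: word prefixes the code points from index i
  let insert_at : PySem.Dict Int String :=
    numbers_chars.foldl
      (fun d kv =>
        (PySem.List.pyRange 0 cs.length).foldl
          (fun d i => if PySem.Chars.startswith (cs.drop i.toNat) kv.1.toList
                      then d.insert i kv.2 else d) d)
      PySem.Dict.empty
  let out :=
    (PySem.List.enumerate cs).foldl
      (fun out p =>
        let out' :=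
          match insert_at.get? p.1 with
          | some v => out ++ v.toList
          | none => out
        out' ++ [p.2]) []
  String.ofList out

-- ===== PRECONDITION & SPEC =====
def Spec_substitute_letters_to_numbers (line : String) (out : String) : Prop := out = substitute_letters_to_numbers_alt line
instance (line : String) (out : String) : Decidable (Spec_substitute_letters_to_numbers line out) := by unfold Spec_substitute_letters_to_numbers; infer_instance

-- ===== CLAIM (what is proved, stated in full; the proofs are below) =====
def Claim_equal_substitute_letters_to_numbers : Prop := ∀ (line : String), Dom_substitute_letters_to_numbers line → Spec_substitute_letters_to_numbers line (substitute_letters_to_numbers line)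

-- ===== LEMMAS AND PROOFS =====

-- proof-only abbreviations for the per-position chunks and B's index dict
def pvChunkA (line : String) (p : ℤ × Char) : List Char :=
  (if PySem.Chars.isalpha p.2 then
     match pvFirstDigitA (PySem.Str.slice line (some p.1) none) numbers_chars with
     | some v => v.toList
     | none => []
   else []) ++ [p.2]

def pvIns (cs : List Char) : PySem.Dict Int String :=
  numbers_chars.foldl
    (fun d kv =>
      (PySem.List.pyRange 0 cs.length).foldl
        (fun d i => if PySem.Chars.startswith (cs.drop i.toNat) kv.1.toList
                    then d.insert i kv.2 else d) d)
    PySem.Dict.empty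

def pvChunkB (d : PySem.Dict Int String) (p : ℤ × Char) : List Char :=
  (match d.get? p.1 with
   | some v => v.toList
   | none => []) ++ [p.2]

-- find s sub = 0 means sub is a prefix of s
theorem pv_find_eq_zero_iff (s sub : List Char) :
    PySem.Chars.find s sub = 0 ↔ sub <+: s := by
  constructor
  · intro h
    have hne : PySem.Chars.findFrom s sub ((0:ℕ):ℤ) ≠ -1 := by
      simp [PySem.Chars.findFrom_zero, h]
    have hspec := PySem.Chars.findFrom_natCast_spec s sub 0 (Nat.zero_le _) hne
    rw [Nat.cast_zero, PySem.Chars.findFrom_zero] at hspec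
    have := hspec.2.1
    rw [h] at this
    simpa using this
  · intro h
    have hinf : sub <:+: s := h.isInfix
    have hnn : 0 ≤ PySem.Chars.find s sub := (PySem.Chars.find_nonneg_iff s sub).mpr hinf
    have hne : PySem.Chars.findFrom s sub ((0:ℕ):ℤ) ≠ -1 := by
      rw [Nat.cast_zero, PySem.Chars.findFrom_zero]; omega
    have hspec := PySem.Chars.findFrom_natCast_spec s sub 0 (Nat.zero_le _) hne
    rw [Nat.cast_zero, PySem.Chars.findFrom_zero] at hspec
    by_contra hne0
    have hpos : 0 < (PySem.Chars.find s sub).toNat := by omega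
    exact hspec.2.2 0 (Nat.zero_le _) hpos (by simpa using h)

-- A's inner loop is find? over the word list
theorem pv_firstDigitA_eq_find? (tail : String) (ws : List (String × String)) :
    pvFirstDigitA tail ws
      = (ws.find? (fun kv => PySem.Chars.startswith tail.toList kv.1.toList)).map (·.2) := by
  induction ws with
  | nil => simp [pvFirstDigitA]
  | cons kv rest ih =>
    obtain ⟨k, v⟩ := kv
    have hfind := pv_find_eq_zero_iff tail.toList k.toList
    have hcond : (PySem.Str.find tail k == 0) = PySem.Chars.startswith tail.toList k.toList := by
      rw [PySem.Str.find_eq]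
      by_cases h : k.toList <+: tail.toList
      · simp [hfind.mpr h, PySem.Chars.startswith_iff, h]
      · have h0 : PySem.Chars.find tail.toList k.toList ≠ 0 := fun hc => h (hfind.mp hc)
        have hs : PySem.Chars.startswith tail.toList k.toList = false := by
          rw [Bool.eq_false_iff]; intro hc; exact h ((PySem.Chars.startswith_iff _ _).mp hc)
        simp [hs, h0]
    rw [pvFirstDigitA, hcond]
    by_cases h : PySem.Chars.startswith tail.toList k.toList = true
    · simp [h]
    · simp [h, ih]

-- B's inner range loop: what the dict holds afterwards
theorem pv_inner_fold_get? (cs : List Char) (w v : String) (n : ℕ) (d : PySem.Dict Int String) (j : ℤ) :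
    ((PySem.List.pyRange 0 (n : ℤ)).foldl
        (fun d i => if PySem.Chars.startswith (cs.drop i.toNat) w.toList
                    then d.insert i v else d) d).get? j
      = if 0 ≤ j ∧ j < (n : ℤ) ∧ PySem.Chars.startswith (cs.drop j.toNat) w.toList
        then some v else d.get? j := by
  induction n generalizing d with
  | zero => simp [PySem.List.pyRange]; intro h1 h2; omega
  | succ m ih =>
    have hsplit : PySem.List.pyRange 0 ((m+1 : ℕ) : ℤ) =
        PySem.List.pyRange 0 (m : ℤ) ++ [(m : ℤ)] := by
      rw [PySem.List.pyRange_one_append 0 (m : ℤ) ((m+1 : ℕ) : ℤ) (by omega) (by push_cast; omega)]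
      congr 1
      rw [PySem.List.pyRange_one_cons (by push_cast; omega)]
      have : ((m:ℤ) + 1) = ((m+1 : ℕ) : ℤ) := by push_cast; ring
      rw [this]
      simp [PySem.List.pyRange]
    rw [hsplit, List.foldl_append]
    simp only [List.foldl_cons, List.foldl_nil]
    by_cases hc : PySem.Chars.startswith (cs.drop ((m:ℤ)).toNat) w.toList = true
    · rw [if_pos hc, PySem.Dict.get?_insert, ih]
      by_cases hj : j = (m : ℤ)
      · subst hj
        have hbig : (0:ℤ) ≤ (m:ℤ) ∧ ((m:ℤ)) < ((m+1 : ℕ) : ℤ) ∧ PySem.Chars.startswith (List.drop ((m:ℤ)).toNat cs) w.toList = true := ⟨by omega, by push_cast; omega, hc⟩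
        rw [if_pos hbig]
        simp
      · rw [if_neg hj]
        by_cases hin : 0 ≤ j ∧ j < (m:ℤ) ∧ PySem.Chars.startswith (cs.drop j.toNat) w.toList
        · rw [if_pos hin, if_pos ⟨hin.1, by push_cast; omega, hin.2.2⟩]
        · rw [if_neg hin, if_neg (by push_cast at *; intro h; exact hin ⟨h.1, by omega, h.2.2⟩)]
    · rw [if_neg hc, ih]
      by_cases hin : 0 ≤ j ∧ j < (m:ℤ) ∧ PySem.Chars.startswith (cs.drop j.toNat) w.toList
      · rw [if_pos hin, if_pos ⟨hin.1, by push_cast; omega, hin.2.2⟩]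
      · rw [if_neg hin]
        rw [if_neg]
        push_cast at *
        intro h
        rcases h with ⟨h1, h2, h3⟩
        by_cases hj : j = (m : ℤ)
        · subst hj; exact hc h3
        · exact hin ⟨h1, by omega, h3⟩

-- B's outer fold: with at-most-one word matching per position, lookup is the first match
theorem pv_outer_fold_get? (cs : List Char) (k : ℕ) (hk : k < cs.length)
    (ws : List (String × String)) (d : PySem.Dict Int String)
    (hpw : ws.Pairwise (fun a b =>
      ¬ (PySem.Chars.startswith (cs.drop k) a.1.toList = true ∧
         PySem.Chars.startswith (cs.drop k) b.1.toList = true))) :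
    (ws.foldl
        (fun d kv =>
          (PySem.List.pyRange 0 (cs.length : ℤ)).foldl
            (fun d i => if PySem.Chars.startswith (cs.drop i.toNat) kv.1.toList
                        then d.insert i kv.2 else d) d) d).get? (k : ℤ)
      = match ws.find? (fun kv => PySem.Chars.startswith (cs.drop k) kv.1.toList) with
        | some kv => some kv.2
        | none => d.get? (k : ℤ) := by
  induction ws generalizing d with
  | nil => simp
  | cons kv rest ih =>
    rw [List.pairwise_cons] at hpw
    rw [List.foldl_cons, ih _ hpw.2]
    have hinner := pv_inner_fold_get? cs kv.1 kv.2 cs.length d (k : ℤ)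
    by_cases hc : PySem.Chars.startswith (cs.drop k) kv.1.toList = true
    · have hnone : rest.find? (fun kv => PySem.Chars.startswith (cs.drop k) kv.1.toList) = none := by
        rw [List.find?_eq_none]
        intro x hx hcx
        exact hpw.1 x hx ⟨hc, hcx⟩
      rw [hnone]
      simp only [List.find?_cons, hc]
      rw [hinner, if_pos ⟨by omega, by omega, by simpa using hc⟩]
    · have hcf : PySem.Chars.startswith (cs.drop k) kv.1.toList = false := by simpa using hc
      simp only [List.find?_cons, hcf]
      cases hfind : rest.find? (fun kv => PySem.Chars.startswith (cs.drop k) kv.1.toList) with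
      | some x => rfl
      | none =>
        simp only []
        rw [hinner, if_neg (by intro h; exact hc (by simpa using h.2.2))]

-- no spelled-out digit word is a prefix of another
theorem pv_words_incomparable :
    numbers_chars.Pairwise (fun a b => ¬ a.1.toList <+: b.1.toList ∧ ¬ b.1.toList <+: a.1.toList) := by
  decide

-- every word starts with an alphabetic character
theorem pv_words_alpha :
    ∀ kv ∈ numbers_chars, kv.1.toList ≠ [] ∧ PySem.Chars.isalpha kv.1.toList.headI = true := by
  decide

-- the per-position uniqueness needed by pv_outer_fold_get?
theorem pv_words_unique (cs : List Char) (k : ℕ) :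
    numbers_chars.Pairwise (fun a b =>
      ¬ (PySem.Chars.startswith (cs.drop k) a.1.toList = true ∧
         PySem.Chars.startswith (cs.drop k) b.1.toList = true)) := by
  refine pv_words_incomparable.imp ?_
  intro a b hab ⟨ha, hb⟩
  have ha' := (PySem.Chars.startswith_iff _ _).mp ha
  have hb' := (PySem.Chars.startswith_iff _ _).mp hb
  rcases List.prefix_or_prefix_of_prefix ha' hb' with h | h
  · exact hab.1 h
  · exact hab.2 h

-- the chunks agree at every in-range position
theorem pv_chunk_eq (line : String) (k : ℕ) (hk : k < line.toList.length) :
    pvChunkA line ((k : ℤ), line.toList[k]) = pvChunkB (pvIns line.toList) ((k : ℤ), line.toList[k]) := by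
  have hget : (pvIns line.toList).get? (k : ℤ)
      = match numbers_chars.find? (fun kv => PySem.Chars.startswith (line.toList.drop k) kv.1.toList) with
        | some kv => some kv.2
        | none => none := by
    rw [pvIns, pv_outer_fold_get? line.toList k hk numbers_chars PySem.Dict.empty (pv_words_unique _ _)]
    cases numbers_chars.find? (fun kv => PySem.Chars.startswith (line.toList.drop k) kv.1.toList) with
    | some x => rfl
    | none => simp [PySem.Dict.empty, PySem.Dict.get?]
  have hslice : (PySem.Str.slice line (some ((k : ℕ) : ℤ)) none).toList = line.toList.drop k := by
    rw [PySem.Str.toList_slice]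
    simp only [PySem.Chars.slice]
    rw [PySem.List.slice_from_natCast]
  have hA := pv_firstDigitA_eq_find? (PySem.Str.slice line (some ((k : ℕ) : ℤ)) none) numbers_chars
  rw [hslice] at hA
  rw [pvChunkA, pvChunkB, hget, hA]
  cases hfind : numbers_chars.find? (fun kv => PySem.Chars.startswith (line.toList.drop k) kv.1.toList) with
  | none => simp
  | some kv =>
    have hmem := List.mem_of_find?_eq_some hfind
    have hpref : kv.1.toList <+: line.toList.drop k := by
      have := List.find?_some hfind
      exact (PySem.Chars.startswith_iff _ _).mp this
    obtain ⟨hne, halpha⟩ := pv_words_alpha kv hmem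
    have halpha_k : PySem.Chars.isalpha line.toList[k] = true := by
      obtain ⟨t, ht⟩ := hpref
      cases hw : kv.1.toList with
      | nil => exact absurd hw hne
      | cons c r =>
        rw [hw] at ht
        rw [← List.getElem_cons_drop hk] at ht
        rw [List.cons_append] at ht
        have hc : c = line.toList[k] := (List.cons_eq_cons.mp ht).1
        rw [hw] at halpha
        simp only [List.headI] at halpha
        rw [← hc]
        exact halpha
    simp [halpha_k]

-- fold bodies produce the concatenation of per-position chunks
theorem pv_foldA (line : String) (l : List (ℤ × Char)) (acc : List Char) :
    l.foldl
      (fun acc p =>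
        let acc' :=
          if PySem.Chars.isalpha p.2 then
            match pvFirstDigitA (PySem.Str.slice line (some p.1) none) numbers_chars with
            | some v => acc ++ v.toList
            | none => acc
          else acc
        acc' ++ [p.2]) acc
      = acc ++ l.flatMap (pvChunkA line) := by
  have hbody : (fun (acc : List Char) (p : ℤ × Char) =>
      let acc' :=
        if PySem.Chars.isalpha p.2 then
          match pvFirstDigitA (PySem.Str.slice line (some p.1) none) numbers_chars with
          | some v => acc ++ v.toList
          | none => acc
        else acc
      acc' ++ [p.2]) = fun acc p => acc ++ pvChunkA line p := by
    funext acc p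
    rw [pvChunkA]
    by_cases h : PySem.Chars.isalpha p.2 = true
    · rw [if_pos h, if_pos h]
      cases pvFirstDigitA (PySem.Str.slice line (some p.1) none) numbers_chars with
      | some v => simp
      | none => simp
    · rw [if_neg h, if_neg h]; simp
  rw [hbody, PySem.List.foldl_append_eq_flatMap]

theorem pv_foldB (d : PySem.Dict Int String) (l : List (ℤ × Char)) (acc : List Char) :
    l.foldl
      (fun out p =>
        let out' :=
          match d.get? p.1 with
          | some v => out ++ v.toList
          | none => out
        out' ++ [p.2]) acc
      = acc ++ l.flatMap (pvChunkB d) := by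
  have hbody : (fun (out : List Char) (p : ℤ × Char) =>
      let out' :=
        match d.get? p.1 with
        | some v => out ++ v.toList
        | none => out
      out' ++ [p.2]) = fun out p => out ++ pvChunkB d p := by
    funext out p
    rw [pvChunkB]
    cases d.get? p.1 with
    | some v => simp
    | none => simp
  rw [hbody, PySem.List.foldl_append_eq_flatMap]

-- ===== VERDICT (by name: the statement is the Claim_ definition above) =====
theorem substitute_letters_to_numbers_spec : Claim_equal_substitute_letters_to_numbers := by
  intro line _
  unfold Spec_substitute_letters_to_numbers
  show substitute_letters_to_numbers line = substitute_letters_to_numbers_alt line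
  rw [substitute_letters_to_numbers, substitute_letters_to_numbers_alt]
  simp only [pv_foldA, pv_foldB]
  congr 1
  apply List.flatMap_congr
  intro p hp
  rw [PySem.List.mem_enumerate_iff] at hp
  obtain ⟨k, hk, hpk⟩ := hp
  subst hpk
  have h := pv_chunk_eq line k hk
  simpa using h
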